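-- pv_equiv track=rewrite | github.com/pypi-data/pypi-mirror-400 | packages/somaya/somaya-1.0.5-py3-none-any.whl/src/core/core_tokenizer.py | _reconstruct_byte_tokens
-- ===== SOURCE A (Python) =====
-- def _reconstruct_byte_tokens(tokens):
--     """Reconstruct text from byte tokens"""
--     # Group tokens by original character index
--     char_groups = {}
--     for token in tokens:
--         char_index = token.get("index", 0)
--         if char_index not in char_groups:
--             char_groups[char_index] = []
--         char_groups[char_index].append(token)
--
--     # Reconstruct each character from its bytes
--     result = ""
--     for char_index in sorted(char_groups.keys()):
--         char_tokens = char_groups[char_index]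
--         # Sort by byte_index
--         char_tokens.sort(key=lambda t: t.get("byte_index", 0))
--
--         # Reconstruct character from UTF-8 bytes
--         byte_values = [t.get("byte_value", 0) for t in char_tokens]
--         char = _reconstruct_char_from_utf8_bytes(byte_values)
--         result += char
--
--     return result
--
-- def _reconstruct_char_from_utf8_bytes(byte_values):
--     """Reconstruct a character from UTF-8 byte values"""
--     if not byte_values:
--         return ""
--
--     # Simple reconstruction based on UTF-8 byte patterns
--     if len(byte_values) == 1:
--         # Single byte ASCII
--         return chr(byte_values[0])
--     elif len(byte_values) == 2:
--         # 2-byte UTF-8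
--         byte1, byte2 = byte_values
--         codepoint = ((byte1 & 0x1F) << 6) | (byte2 & 0x3F)
--         return chr(codepoint)
--     elif len(byte_values) == 3:
--         # 3-byte UTF-8
--         byte1, byte2, byte3 = byte_values
--         codepoint = ((byte1 & 0x0F) << 12) | ((byte2 & 0x3F) << 6) | (byte3 & 0x3F)
--         return chr(codepoint)
--     elif len(byte_values) == 4:
--         # 4-byte UTF-8
--         byte1, byte2, byte3, byte4 = byte_values
--         codepoint = ((byte1 & 0x07) << 18) | ((byte2 & 0x3F) << 12) | ((byte3 & 0x3F) << 6) | (byte4 & 0x3F)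
--         return chr(codepoint)
--     else:
--         # Fallback
--         return chr(byte_values[0])
-- ===== SOURCE B (Python) =====
-- def _reconstruct_char_from_utf8_bytes(byte_values):
--     """Reconstruct a character from UTF-8 byte values"""
--     if not byte_values:
--         return ""
--     if len(byte_values) == 1:
--         return chr(byte_values[0])
--     elif len(byte_values) == 2:
--         byte1, byte2 = byte_values
--         return chr(((byte1 & 0x1F) << 6) | (byte2 & 0x3F))
--     elif len(byte_values) == 3:
--         byte1, byte2, byte3 = byte_values
--         return chr(((byte1 & 0x0F) << 12) | ((byte2 & 0x3F) << 6) | (byte3 & 0x3F))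
--     elif len(byte_values) == 4:
--         byte1, byte2, byte3, byte4 = byte_values
--         return chr(((byte1 & 0x07) << 18) | ((byte2 & 0x3F) << 12) | ((byte3 & 0x3F) << 6) | (byte4 & 0x3F))
--     else:
--         return chr(byte_values[0])
--
--
-- def _reconstruct_byte_tokens(tokens):
--     """Reconstruct text from byte tokens: no dict of groups — two stable sorts
--     put every token in its final position ((index, byte_index) order), then one
--     linear scan over consecutive runs of equal index decodes each character."""
--     ordered = sorted(tokens, key=lambda t: t.get("byte_index", 0))
--     ordered = sorted(ordered, key=lambda t: t.get("index", 0))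
--     parts = []
--     i, n = 0, len(ordered)
--     while i < n:
--         k = ordered[i].get("index", 0)
--         j = i
--         while j < n and ordered[j].get("index", 0) == k:
--             j += 1
--         parts.append(_reconstruct_char_from_utf8_bytes(
--             [t.get("byte_value", 0) for t in ordered[i:j]]))
--         i = j
--     return "".join(parts)
-- ===== Notes on version B (the rewrite author's own statement) =====
-- stated objective: alternative
-- what changed: B removes A's dict bucketing and per-group sorts entirely: two stable whole-list sorts (by byte_index, then by index) put every token in final (index, byte_index) order, and a single linear scan over consecutive runs of equal index decodes each character.
import Mathlib
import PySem

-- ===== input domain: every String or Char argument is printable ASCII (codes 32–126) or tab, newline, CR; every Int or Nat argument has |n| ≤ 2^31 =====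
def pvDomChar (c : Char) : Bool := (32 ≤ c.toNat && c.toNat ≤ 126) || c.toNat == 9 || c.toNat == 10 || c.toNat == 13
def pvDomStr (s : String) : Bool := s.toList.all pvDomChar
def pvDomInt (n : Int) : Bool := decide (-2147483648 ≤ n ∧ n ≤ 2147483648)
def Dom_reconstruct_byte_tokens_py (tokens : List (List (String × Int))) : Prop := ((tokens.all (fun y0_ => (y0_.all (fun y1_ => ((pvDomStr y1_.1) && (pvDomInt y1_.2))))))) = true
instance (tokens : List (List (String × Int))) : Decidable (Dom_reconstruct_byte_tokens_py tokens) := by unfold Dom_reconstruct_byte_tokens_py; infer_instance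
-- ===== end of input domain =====

-- B replaces A's dict bucketing + per-group sorts by two stable whole-list sorts followed by one
-- linear scan over consecutive runs of equal index (alternative decomposition, same cost).

-- ===== PORT A =====
-- token.get(key, 0): first-match lookup in the association list (Python dict .get)
def tokGetD (t : List (String × Int)) (k : String) : Int :=
  ((t.find? (fun p => p.1 == k)).map Prod.snd).getD 0

-- chr(n) as a one-char codepoint list; exact for the codepoints Pre_ admits (0 ≤ n, a valid Unicode scalar value)
def pyChrChars (n : Int) : List Char := [Char.ofNat n.toNat]

-- literal port of the shared module helper _reconstruct_char_from_utf8_bytes (both Pythons call it)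
def reconstruct_char_from_utf8_bytes (bs : List Int) : List Char :=
  match bs with
  | [] => []
  | [b1] => pyChrChars b1
  | [b1, b2] => pyChrChars (PySem.Int.bor ((PySem.Int.band b1 31) <<< (6:Nat)) (PySem.Int.band b2 63))
  | [b1, b2, b3] => pyChrChars (PySem.Int.bor (PySem.Int.bor ((PySem.Int.band b1 15) <<< (12:Nat)) ((PySem.Int.band b2 63) <<< (6:Nat))) (PySem.Int.band b3 63))
  | [b1, b2, b3, b4] => pyChrChars (PySem.Int.bor (PySem.Int.bor (PySem.Int.bor ((PySem.Int.band b1 7) <<< (18:Nat)) ((PySem.Int.band b2 63) <<< (12:Nat))) ((PySem.Int.band b3 63) <<< (6:Nat))) (PySem.Int.band b4 63))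
  | b1 :: _ => pyChrChars b1

-- string concatenation is ported on List Char (exact); result += char is the foldl append
def reconstruct_byte_tokens_py (tokens : List (List (String × Int))) : String :=
  let char_groups : PySem.Dict Int (List (List (String × Int))) :=
    tokens.foldl (fun d t =>
      (d.setdefault (tokGetD t "index") []).modify (tokGetD t "index") [] (· ++ [t]))
      PySem.Dict.empty
  let result : List Char :=
    (PySem.List.sorted char_groups.keys (fun k => k) false).foldl (fun acc k =>
      let char_tokens := PySem.List.sorted (char_groups.getD k []) (fun t => tokGetD t "byte_index") false
      let byte_values := char_tokens.map (fun t => tokGetD t "byte_value")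
      acc ++ reconstruct_char_from_utf8_bytes byte_values) []
  String.ofList result

-- ===== PORT B =====
-- the run scan: B's outer while loop; the inner while that advances j over the run is the takeWhile,
-- 'i = j' is the recursion on the dropWhile suffix
def groupRuns (s : List (List (String × Int))) : List (List Char) :=
  match s with
  | [] => []
  | t :: rest =>
    reconstruct_char_from_utf8_bytes
      ((t :: rest.takeWhile (fun u => tokGetD u "index" == tokGetD t "index")).map
        (fun u => tokGetD u "byte_value"))
      :: groupRuns (rest.dropWhile (fun u => tokGetD u "index" == tokGetD t "index"))
termination_by s.length
decreasing_by simpa using Nat.lt_succ_of_le (List.length_dropWhile_le _ _)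

def reconstruct_byte_tokens_py_alt (tokens : List (List (String × Int))) : String :=
  let ordered := PySem.List.sorted tokens (fun t => tokGetD t "byte_index") false
  let ordered2 := PySem.List.sorted ordered (fun t => tokGetD t "index") false
  String.ofList (groupRuns ordered2).flatten

-- ===== PRECONDITION & SPEC =====
-- the byte values of the group of a given character index, in the order both Pythons feed them to chr
def groupByteValues (tokens : List (List (String × Int))) (k : Int) : List Int :=
  (PySem.List.sorted (tokens.filter (fun t => tokGetD t "index" == k)) (fun t => tokGetD t "byte_index") false).map
    (fun t => tokGetD t "byte_value")

-- the argument chr() receives for a group (none = empty group, no chr call)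
def utf8Codepoint? (bs : List Int) : Option Int :=
  match bs with
  | [] => none
  | [b1] => some b1
  | [b1, b2] => some (PySem.Int.bor ((PySem.Int.band b1 31) <<< (6:Nat)) (PySem.Int.band b2 63))
  | [b1, b2, b3] => some (PySem.Int.bor (PySem.Int.bor ((PySem.Int.band b1 15) <<< (12:Nat)) ((PySem.Int.band b2 63) <<< (6:Nat))) (PySem.Int.band b3 63))
  | [b1, b2, b3, b4] => some (PySem.Int.bor (PySem.Int.bor (PySem.Int.bor ((PySem.Int.band b1 7) <<< (18:Nat)) ((PySem.Int.band b2 63) <<< (12:Nat))) ((PySem.Int.band b3 63) <<< (6:Nat))) (PySem.Int.band b4 63))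
  | b1 :: _ => some b1

-- a Unicode scalar value: what chr() accepts AND a Lean Char can hold (Python also accepts lone surrogates 0xD800–0xDFFF)
def validCodepointB (n : Int) : Bool := decide (0 ≤ n ∧ (n < 55296 ∨ (57344 ≤ n ∧ n ≤ 1114111)))

-- Pre_ excludes inputs where some group's chr() argument is negative or > 0x10FFFF (Python raises ValueError) or a lone
-- surrogate (Python returns a one-surrogate str that no Lean String can represent — A and B agree there in Python).
def Pre_reconstruct_byte_tokens_py (tokens : List (List (String × Int))) : Prop :=
  ∀ t ∈ tokens, (utf8Codepoint? (groupByteValues tokens (tokGetD t "index"))).all validCodepointB = true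
instance (tokens : List (List (String × Int))) : Decidable (Pre_reconstruct_byte_tokens_py tokens) := by unfold Pre_reconstruct_byte_tokens_py; infer_instance

def pvWitness_reconstruct_byte_tokens_py : (List (List (String × Int))) :=
  [[("index", 0), ("byte_value", 72)], [("index", 1), ("byte_value", 105)]]

def Spec_reconstruct_byte_tokens_py (tokens : List (List (String × Int))) (out : String) : Prop := out = reconstruct_byte_tokens_py_alt tokens
instance (tokens : List (List (String × Int))) (out : String) : Decidable (Spec_reconstruct_byte_tokens_py tokens out) := by unfold Spec_reconstruct_byte_tokens_py; infer_instance

-- ===== CLAIM (what is proved, stated in full; the proofs are below) =====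
def Claim_equal_reconstruct_byte_tokens_py : Prop := ∀ (tokens : List (List (String × Int))), Dom_reconstruct_byte_tokens_py tokens → Pre_reconstruct_byte_tokens_py tokens → Spec_reconstruct_byte_tokens_py tokens (reconstruct_byte_tokens_py tokens)

-- ===== LEMMAS AND PROOFS =====

-- abbreviations for the two sort keys (proof-side only)
def kIdx (t : List (String × Int)) : Int := tokGetD t "index"
def kByt (t : List (String × Int)) : Int := tokGetD t "byte_index"

-- ---- A-side: the dict A builds ----

-- A's "if k not in d: d[k] = []; d[k].append(t)" step equals one modify with default []
theorem setdefault_modify_eq_modify (d : PySem.Dict Int (List (List (String × Int)))) (k : Int)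
    (f : List (List (String × Int)) → List (List (String × Int))) :
    (d.setdefault k []).modify k [] f = d.modify k [] f := by
  rcases h : d.contains k with h | h
  · rw [PySem.Dict.setdefault_of_not_contains d _ h]
    apply PySem.Dict.ext
    unfold PySem.Dict.modify
    rw [PySem.Dict.getD_insert_self, PySem.Dict.getD_of_not_contains d _ h,
        PySem.Dict.items_insert_of_contains _ _ (PySem.Dict.contains_insert_self d k []),
        PySem.Dict.items_insert_of_not_contains d _ h,
        PySem.Dict.items_insert_of_not_contains d _ h]
    have hk : k ∉ d.keys := by
      intro hm; rw [← PySem.Dict.contains_iff_mem_keys] at hm; simp [h] at hm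
    have hmap : ∀ p ∈ d.items, (if (p.1 == k) = true then (k, f []) else p) = p := by
      intro p hp
      have : p.1 ≠ k := fun e => hk (e ▸ PySem.Dict.mem_keys_of_mem_items d hp)
      simp [this]
    rw [List.map_append, List.map_congr_left hmap]
    simp
  · rw [PySem.Dict.setdefault_of_contains d _ h]

theorem update_keys_empty (l : List Int) :
    PySem.Set.update (PySem.Dict.empty (ν := List (List (String × Int)))).keys l = PySem.Set.ofList l := by
  simp [PySem.Set.update, PySem.Set.ofList, PySem.Dict.keys_empty]

-- lookups in A's dict are the per-index filters
theorem groups_getD (tokens : List (List (String × Int))) (k : Int) :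
    (tokens.foldl (fun d t => d.modify (tokGetD t "index") [] (· ++ [t])) PySem.Dict.empty).getD k []
      = tokens.filter (fun t => tokGetD t "index" == k) := by
  have h := PySem.Dict.getD_foldl_modify_append
    (tokens.map (fun t => ((tokGetD t "index"), t))) (PySem.Dict.empty) k
  rw [List.foldl_map] at h
  simpa [List.filter_map, Function.comp_def] using h

-- its keys are the distinct indices in first-occurrence order
theorem groups_keys (tokens : List (List (String × Int))) :
    (tokens.foldl (fun d t => d.modify (tokGetD t "index") [] (· ++ [t])) PySem.Dict.empty).keys
      = PySem.Set.ofList (tokens.map (fun t => tokGetD t "index")) := by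
  rw [PySem.Dict.keys_foldl_modify_key tokens (fun t => tokGetD t "index") [] (fun _ t v => v ++ [t])]
  exact update_keys_empty _

-- ---- B-side: stability of the insertion sort ----

-- inserting x before every element of l puts it at the head
theorem insertBy_eq_cons_of_forall {α : Type} (b : α → α → Bool) (x : α) (l : List α)
    (h : ∀ z ∈ l, b x z = true) : PySem.List.insertBy b x l = x :: l := by
  cases l with
  | nil => rfl
  | cons y ys => simp [PySem.List.insertBy, h y (by simp)]

-- filtering commutes with one insertion step into a key-sorted accumulator
theorem filter_insertBy {α κ : Type} [LinearOrder κ] (key : α → κ) (p : α → Bool) (x : α)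
    (acc : List α) (hs : acc.Pairwise (fun a b => key a ≤ key b)) :
    (PySem.List.insertBy (fun a b => decide (key a < key b)) x acc).filter p
      = if p x then PySem.List.insertBy (fun a b => decide (key a < key b)) x (acc.filter p)
        else acc.filter p := by
  induction acc with
  | nil => cases h : p x <;> simp [PySem.List.insertBy, h]
  | cons y ys ih =>
    rcases List.pairwise_cons.mp hs with ⟨hy, hys⟩
    have hins : ∀ l, PySem.List.insertBy (fun a b => decide (key a < key b)) x (y :: l)
        = if key x < key y then x :: y :: l
          else y :: PySem.List.insertBy (fun a b => decide (key a < key b)) x l := by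
      intro l; simp [PySem.List.insertBy]
    by_cases hlt : key x < key y
    · have hall : ∀ z ∈ (y :: ys).filter p, decide (key x < key z) = true := by
        intro z hz
        have hz' := List.mem_of_mem_filter hz
        rcases List.mem_cons.mp hz' with rfl | hz''
        · simpa using hlt
        · simpa using lt_of_lt_of_le hlt (hy z hz'')
      rw [hins, if_pos hlt]
      cases h : p x
      · simp [List.filter_cons, h]
      · rw [insertBy_eq_cons_of_forall _ _ _ hall]
        simp [List.filter_cons, h]
    · rw [hins, if_neg hlt]
      cases hy' : p y
      · simp only [List.filter_cons, hy', Bool.false_eq_true, if_false]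
        rw [ih hys]
      · simp only [List.filter_cons, hy', if_true]
        rw [ih hys]
        cases h : p x
        · simp
        · simp only [if_true]
          rw [hins, if_neg hlt]

-- filtering commutes with the whole stable sort
theorem filter_foldl_insertBy {α κ : Type} [LinearOrder κ] (key : α → κ) (p : α → Bool)
    (xs acc : List α) (hs : acc.Pairwise (fun a b => key a ≤ key b)) :
    (xs.foldl (fun acc x => PySem.List.insertBy (fun a b => decide (key a < key b)) x acc) acc).filter p
      = (xs.filter p).foldl (fun acc x => PySem.List.insertBy (fun a b => decide (key a < key b)) x acc) (acc.filter p) := by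
  induction xs generalizing acc with
  | nil => simp
  | cons x xs ih =>
    have hs' : (PySem.List.insertBy (fun a b => decide (key a < key b)) x acc).Pairwise
        (fun a b => key a ≤ key b) := PySem.List.insertBy_pairwise_le key x acc hs
    rw [List.foldl_cons, ih _ hs', filter_insertBy key p x acc hs, List.filter_cons]
    cases h : p x <;> simp

theorem filter_sorted {α κ : Type} [LinearOrder κ] (key : α → κ) (p : α → Bool) (xs : List α) :
    (PySem.List.sorted xs key false).filter p = PySem.List.sorted (xs.filter p) key false := by
  rw [PySem.List.sorted_eq_foldl_insertBy, PySem.List.sorted_eq_foldl_insertBy]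
  exact filter_foldl_insertBy key p xs [] (by simp)

-- filtering a key-equality class out of a sort BY THAT KEY returns the class in input order (stability)
theorem filter_key_sorted {α : Type} (key : α → Int) (k : Int) (xs : List α) :
    (PySem.List.sorted xs key false).filter (fun x => key x == k) = xs.filter (fun x => key x == k) := by
  rw [filter_sorted]
  apply PySem.List.sorted_eq_self_of_pairwise
  have : ∀ x ∈ xs.filter (fun x => key x == k), key x = k := by
    intro x hx
    simpa using (List.mem_filter.mp hx).2
  refine List.Pairwise.imp_of_mem ?_ (List.pairwise_of_forall_mem_list (fun a _ b _ => True.intro))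
  intro a b ha hb _
  rw [this a ha, this b hb]

-- ---- B-side: the run scan ----

-- the keys of the run heads, same recursion as groupRuns
def runKeys (s : List (List (String × Int))) : List Int :=
  match s with
  | [] => []
  | t :: rest => kIdx t :: runKeys (rest.dropWhile (fun u => tokGetD u "index" == tokGetD t "index"))
termination_by s.length
decreasing_by simpa using Nat.lt_succ_of_le (List.length_dropWhile_le _ _)

theorem mem_runKeys (s : List (List (String × Int))) (k : Int) :
    k ∈ runKeys s ↔ k ∈ s.map kIdx := by
  induction s using runKeys.induct with
  | case1 => simp [runKeys]
  | case2 t rest ih =>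
    rw [runKeys]
    constructor
    · intro h
      rcases List.mem_cons.mp h with rfl | h
      · simp [kIdx]
      · rcases List.mem_map.mp (ih.mp h) with ⟨u, hu, rfl⟩
        exact List.mem_map_of_mem ((List.dropWhile_sublist _).subset hu |> List.mem_cons_of_mem t)
    · intro h
      rcases List.mem_map.mp h with ⟨u, hu, rfl⟩
      rcases List.mem_cons.mp hu with rfl | hu
      · exact List.mem_cons_self
      · rcases (List.takeWhile_append_dropWhile
            (p := fun u => tokGetD u "index" == tokGetD t "index") (l := rest)) ▸ hu
          |> List.mem_append.mp with h1 | h2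
        · have := List.mem_takeWhile_imp h1
          simp only [beq_iff_eq] at this
          exact List.mem_cons.mpr (Or.inl (by simp [kIdx, this]))
        · exact List.mem_cons_of_mem _ (ih.mpr (List.mem_map_of_mem h2))

-- every element of the dropWhile suffix has a strictly larger key (the list being key-sorted)
theorem dropWhile_keys_gt (t : List (String × Int)) (rest : List (List (String × Int)))
    (hp : (t :: rest).Pairwise (fun a b => kIdx a ≤ kIdx b)) :
    ∀ u ∈ rest.dropWhile (fun u => tokGetD u "index" == tokGetD t "index"), kIdx t < kIdx u := by
  rcases List.pairwise_cons.mp hp with ⟨hle, hrest⟩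
  cases hdw : rest.dropWhile (fun u => tokGetD u "index" == tokGetD t "index") with
  | nil => simp
  | cons h tl =>
    have hhd : ¬ (tokGetD h "index" == tokGetD t "index") = true := by
      have := List.head?_dropWhile_not (fun u => tokGetD u "index" == tokGetD t "index") rest
      rw [hdw] at this; simpa using this
    have hmemh : h ∈ rest := (List.dropWhile_sublist _).subset (hdw ▸ List.mem_cons_self)
    have hth : kIdx t < kIdx h := by
      have h2 := hle h hmemh
      simp only [beq_iff_eq] at hhd
      simp only [kIdx] at h2 ⊢
      omega
    intro u hu
    rcases List.mem_cons.mp hu with rfl | hu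
    · exact hth
    · have hpw : (h :: tl).Pairwise (fun a b => kIdx a ≤ kIdx b) :=
        (hdw ▸ List.Pairwise.sublist (List.dropWhile_sublist _) hrest)
      exact lt_of_lt_of_le hth ((List.pairwise_cons.mp hpw).1 u hu)

-- run-head keys are strictly increasing on a key-sorted list
theorem runKeys_pairwise_lt (s : List (List (String × Int)))
    (hp : s.Pairwise (fun a b => kIdx a ≤ kIdx b)) :
    (runKeys s).Pairwise (fun a b => a < b) := by
  induction s using runKeys.induct with
  | case1 => simp [runKeys]
  | case2 t rest ih =>
    rw [runKeys]
    have hgt := dropWhile_keys_gt t rest hp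
    have hrest : (rest.dropWhile (fun u => tokGetD u "index" == tokGetD t "index")).Pairwise
        (fun a b => kIdx a ≤ kIdx b) :=
      List.Pairwise.sublist (List.dropWhile_sublist _) (List.pairwise_cons.mp hp).2
    refine List.pairwise_cons.mpr ⟨?_, ih hrest⟩
    intro k hk
    rcases List.mem_map.mp ((mem_runKeys _ k).mp hk) with ⟨u, hu, rfl⟩
    exact hgt u hu

-- on a key-sorted list the run scan is: for each run-head key, decode the filtered class
theorem groupRuns_eq (s : List (List (String × Int)))
    (hp : s.Pairwise (fun a b => kIdx a ≤ kIdx b)) :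
    groupRuns s = (runKeys s).map (fun k =>
      reconstruct_char_from_utf8_bytes
        ((s.filter (fun u => tokGetD u "index" == k)).map (fun u => tokGetD u "byte_value"))) := by
  induction s using runKeys.induct with
  | case1 => simp [groupRuns, runKeys]
  | case2 t rest ih =>
    have hgt := dropWhile_keys_gt t rest hp
    have hrest : (rest.dropWhile (fun u => tokGetD u "index" == tokGetD t "index")).Pairwise
        (fun a b => kIdx a ≤ kIdx b) :=
      List.Pairwise.sublist (List.dropWhile_sublist _) (List.pairwise_cons.mp hp).2
    have hsplit : rest = rest.takeWhile (fun u => tokGetD u "index" == tokGetD t "index")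
        ++ rest.dropWhile (fun u => tokGetD u "index" == tokGetD t "index") :=
      (List.takeWhile_append_dropWhile).symm
    rw [groupRuns, runKeys, List.map_cons, ih hrest]
    congr 1
    · -- head group: the filter of the head key is t :: its takeWhile run
      have h1 : (t :: rest).filter (fun u => tokGetD u "index" == kIdx t)
          = t :: rest.takeWhile (fun u => tokGetD u "index" == tokGetD t "index") := by
        rw [List.filter_cons, if_pos (by simp [kIdx])]
        congr 1
        conv_lhs => rw [hsplit]
        rw [List.filter_append,
            List.filter_eq_self.mpr (fun v hv => by
              have h3 := List.mem_takeWhile_imp hv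
              simpa [kIdx] using h3),
            List.filter_eq_nil_iff.mpr (fun v hv => by
              have h3 := hgt v hv
              simp only [kIdx] at h3
              simp only [beq_iff_eq, kIdx]
              omega),
            List.append_nil]
      dsimp only
      rw [h1, List.map_cons]
    · -- tail groups: the head and its run contribute nothing to strictly larger keys
      apply List.map_congr_left
      intro k hk
      rcases List.mem_map.mp ((mem_runKeys _ k).mp hk) with ⟨u, hu, rfl⟩
      have hku : kIdx t < kIdx u := hgt u hu
      have h2 : (t :: rest).filter (fun v => tokGetD v "index" == kIdx u)
          = (rest.dropWhile (fun v => tokGetD v "index" == tokGetD t "index")).filter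
              (fun v => tokGetD v "index" == kIdx u) := by
        rw [List.filter_cons, if_neg (by
          simp only [beq_iff_eq, kIdx]
          simp only [kIdx] at hku
          omega)]
        conv_lhs => rw [hsplit]
        rw [List.filter_append,
            List.filter_eq_nil_iff.mpr (fun v hv => by
              have h3 := List.mem_takeWhile_imp hv
              simp only [beq_iff_eq] at h3
              simp only [beq_iff_eq, kIdx]
              simp only [kIdx] at hku
              omega),
            List.nil_append]
      rw [h2]

-- the run-head keys of B's fully sorted list ARE A's sorted distinct indices
theorem runKeys_eq_sorted_keys (tokens : List (List (String × Int))) :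
    PySem.List.sorted (PySem.Set.ofList (tokens.map (fun t => tokGetD t "index"))) (fun k => k) false
      = runKeys (PySem.List.sorted
          (PySem.List.sorted tokens (fun t => tokGetD t "byte_index") false)
          (fun t => tokGetD t "index") false) := by
  set s := PySem.List.sorted
      (PySem.List.sorted tokens (fun t => tokGetD t "byte_index") false)
      (fun t => tokGetD t "index") false with hs
  have hpair : s.Pairwise (fun a b => kIdx a ≤ kIdx b) :=
    PySem.List.sorted_pairwise _ _
  have hlt : (runKeys s).Pairwise (fun a b => a < b) := runKeys_pairwise_lt s hpair
  apply PySem.List.sorted_eq_of_perm_of_pairwise_lt _ _ (fun k => k) _ hlt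
  · -- permutation: both are nodup with the same members
    have hnd1 : (runKeys s).Nodup := hlt.imp ne_of_lt
    have hnd2 : (PySem.Set.ofList (tokens.map (fun t => tokGetD t "index"))).Nodup :=
      PySem.Set.nodup_ofList _
    rw [List.perm_ext_iff_of_nodup hnd1 hnd2]
    intro k
    rw [mem_runKeys, PySem.Set.mem_ofList]
    have hperm : s.Perm tokens :=
      (PySem.List.sorted_perm _ _ _).trans (PySem.List.sorted_perm _ _ _)
    constructor
    · intro h
      rcases List.mem_map.mp h with ⟨u, hu, rfl⟩
      exact List.mem_map_of_mem (hperm.subset hu)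
    · intro h
      rcases List.mem_map.mp h with ⟨u, hu, rfl⟩
      exact List.mem_map_of_mem (hperm.symm.subset hu)

-- B's class of index k, read off the fully sorted list, is A's per-group sort
theorem filter_double_sorted (tokens : List (List (String × Int))) (k : Int) :
    (PySem.List.sorted (PySem.List.sorted tokens (fun t => tokGetD t "byte_index") false)
        (fun t => tokGetD t "index") false).filter (fun u => tokGetD u "index" == k)
      = PySem.List.sorted (tokens.filter (fun t => tokGetD t "index" == k))
          (fun t => tokGetD t "byte_index") false := by
  rw [filter_key_sorted (fun t => tokGetD t "index") k, filter_sorted]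

-- ===== VERDICT (by name: the statement is the Claim_ definition above) =====
theorem reconstruct_byte_tokens_py_spec : Claim_equal_reconstruct_byte_tokens_py := by
  intro tokens _ _
  unfold Spec_reconstruct_byte_tokens_py reconstruct_byte_tokens_py reconstruct_byte_tokens_py_alt
  have hstep : ∀ (d : PySem.Dict Int (List (List (String × Int)))) (t : List (String × Int)), t ∈ tokens →
      (d.setdefault (tokGetD t "index") []).modify (tokGetD t "index") [] (· ++ [t])
        = d.modify (tokGetD t "index") [] (· ++ [t]) := fun d t _ => setdefault_modify_eq_modify d _ _
  dsimp only
  rw [PySem.List.foldl_congr_mem tokens _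
      (fun d t => d.modify (tokGetD t "index") [] (· ++ [t])) PySem.Dict.empty hstep]
  simp only [groups_getD, groups_keys, PySem.List.foldl_append_eq_flatMap, List.nil_append]
  rw [groupRuns_eq
        (PySem.List.sorted (PySem.List.sorted tokens (fun t => tokGetD t "byte_index") false)
          (fun t => tokGetD t "index") false)
        (PySem.List.sorted_pairwise _ _),
      runKeys_eq_sorted_keys tokens]
  congr 1
  rw [List.flatMap_def]
  apply congrArg
  apply List.map_congr_left
  intro k _
  rw [filter_double_sorted]
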